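-- pv_equiv track=rewrite | github.com/galjs/clean_code | clean_code/algorithms.py | odd_palindrome_length
-- ===== SOURCE A (Python) =====
-- def odd_palindrome_length(base_string, middle):
--     length = 1
--     distance = 1
--     while distance + middle < len(base_string) and middle >= distance:
--         if base_string[middle + distance] == base_string[middle - distance]:
--             length += 2
--             distance += 1
--         else:
--             break
--     return length
-- ===== SOURCE B (Python) =====
-- def odd_palindrome_length(base_string, middle):
--     radius = max(0, min(middle, len(base_string) - middle - 1))
--     left = base_string[middle - radius:middle][::-1]
--     right = base_string[middle + 1:middle + 1 + radius]
--     count = 0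
--     for a, b in zip(left, right):
--         if a != b:
--             break
--         count += 1
--     return 1 + 2 * count
-- ===== Notes on version B (the rewrite author's own statement) =====
-- stated objective: alternative
-- what changed: Replaces A's index-bound while loop with a slice-based decomposition: compute the usable radius inside the string, reverse the prefix slice left of the center, zip it with the suffix slice, and count the leading equal pairs; the answer is 1 + 2*count.
import Mathlib
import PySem

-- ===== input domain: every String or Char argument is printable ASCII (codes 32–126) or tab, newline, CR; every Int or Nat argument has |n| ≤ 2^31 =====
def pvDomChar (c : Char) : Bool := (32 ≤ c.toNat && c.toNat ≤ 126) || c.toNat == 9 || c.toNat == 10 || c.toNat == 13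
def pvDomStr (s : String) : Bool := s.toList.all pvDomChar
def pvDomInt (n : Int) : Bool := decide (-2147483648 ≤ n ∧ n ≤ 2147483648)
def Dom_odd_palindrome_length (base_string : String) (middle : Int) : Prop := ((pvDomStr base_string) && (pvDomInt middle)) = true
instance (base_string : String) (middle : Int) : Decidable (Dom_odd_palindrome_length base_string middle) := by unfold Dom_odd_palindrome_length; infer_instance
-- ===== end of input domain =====

-- B replaces A's index-bound while loop with a slice decomposition: compute the usable radius,
-- reverse the prefix slice left of the center, zip it with the suffix slice, count the leading
-- equal pairs (alternative decomposition, same cost).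

-- ===== PORT A =====
-- the while loop of A: state (length, distance); terminates because distance+middle grows toward len
def oplLoop (s : List Char) (middle length distance : Int) : Int :=
  if h : distance + middle < (s.length : Int) ∧ distance ≤ middle then
    if PySem.List.pyGet? s (middle + distance) = PySem.List.pyGet? s (middle - distance) then
      oplLoop s middle (length + 2) (distance + 1)
    else length
  else length
termination_by ((s.length : Int) - (distance + middle)).toNat
decreasing_by omega

def odd_palindrome_length (base_string : String) (middle : Int) : Int :=
  oplLoop base_string.toList middle 1 1

-- ===== PORT B =====
-- count of leading equal pairs (the for/break loop of Source B)
def countEq : List (Char × Char) → Int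
  | [] => 0
  | (a, b) :: t => if a = b then 1 + countEq t else 0

def odd_palindrome_length_alt (base_string : String) (middle : Int) : Int :=
  let s := base_string.toList
  let radius := max 0 (min middle ((s.length : Int) - middle - 1))
  let left := (PySem.List.slice s (some (middle - radius)) (some middle)).reverse
  let right := PySem.List.slice s (some (middle + 1)) (some (middle + 1 + radius))
  1 + 2 * countEq (left.zip right)

-- ===== PRECONDITION & SPEC =====
def Spec_odd_palindrome_length (base_string : String) (middle : Int) (out : Int) : Prop := out = odd_palindrome_length_alt base_string middle
instance (base_string : String) (middle : Int) (out : Int) : Decidable (Spec_odd_palindrome_length base_string middle out) := by unfold Spec_odd_palindrome_length; infer_instance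

-- ===== CLAIM (what is proved, stated in full; the proofs are below) =====
def Claim_equal_odd_palindrome_length : Prop := ∀ (base_string : String) (middle : Int), Dom_odd_palindrome_length base_string middle → Spec_odd_palindrome_length base_string middle (odd_palindrome_length base_string middle)

-- ===== LEMMAS AND PROOFS =====

-- empty slice s[a:a]
theorem slice_self (s : List Char) (a : Int) : PySem.List.slice s (some a) (some a) = [] := by
  apply List.eq_nil_of_length_eq_zero
  rw [PySem.List.length_slice]
  omega

-- Loop characterisation: at distance d (1 ≤ d), the loop adds twice the number of
-- leading equal pairs of the zipped (reversed-prefix, suffix) lists, past the first d-1 pairs.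
theorem oplLoop_eq (s : List Char) (fuel : Nat) (L : Int) (n d : Nat) (hd : 1 ≤ d)
    (hf : s.length - (n + d) ≤ fuel) :
    oplLoop s (n : Int) L (d : Int) =
      L + 2 * countEq ((((s.take n).reverse.drop (d - 1)).zip ((s.drop (n + 1)).drop (d - 1)))) := by
  induction fuel generalizing L d with
  | zero =>
      have hlen : s.length ≤ n + d := by omega
      rw [oplLoop]
      have hcond : ¬ ((d : Int) + (n : Int) < (s.length : Int) ∧ (d : Int) ≤ (n : Int)) := by
        omega
      rw [dif_neg hcond]
      have hr : ((s.drop (n + 1)).drop (d - 1)) = [] := by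
        apply List.eq_nil_of_length_eq_zero
        simp [List.length_drop]; omega
      rw [hr, List.zip_nil_right]
      simp [countEq]
  | succ fuel ih =>
      rw [oplLoop]
      by_cases hcond : (d : Int) + (n : Int) < (s.length : Int) ∧ (d : Int) ≤ (n : Int)
      · rw [dif_pos hcond]
        have hdn : d ≤ n := by exact_mod_cast hcond.2
        have hlt : n + d < s.length := by
          have := hcond.1; push_cast at this; omega
        have hnlt : n < s.length := by omega
        have htake : (s.take n).length = n := by simp [List.length_take]; omega
        have hleft : d - 1 < (s.take n).reverse.length := by simp [htake]; omega
        have hright : d - 1 < (s.drop (n + 1)).length := by simp [List.length_drop]; omega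
        have hL : (s.take n).reverse[d - 1]'hleft = s[n - d]'(by omega) := by
          rw [List.getElem_reverse]
          rw [List.getElem_take]
          congr 1
          simp [htake]; omega
        have hR : (s.drop (n + 1))[d - 1]'hright = s[n + d]'hlt := by
          rw [List.getElem_drop]
          congr 1; omega
        have hzip :
            (((s.take n).reverse.drop (d - 1)).zip ((s.drop (n + 1)).drop (d - 1))) =
              (s[n - d]'(by omega), s[n + d]'hlt) ::
                (((s.take n).reverse.drop d).zip ((s.drop (n + 1)).drop d)) := by
          have hd1 : d - 1 + 1 = d := by omega
          rw [List.drop_eq_getElem_cons hleft, List.drop_eq_getElem_cons hright, hd1]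
          rw [List.zip_cons_cons, hL, hR]
        have hgetp : PySem.List.pyGet? s ((n : Int) + (d : Int)) = some (s[n + d]'hlt) := by
          have : (n : Int) + (d : Int) = ((n + d : Nat) : Int) := by push_cast; ring
          rw [this, PySem.List.pyGet?_natCast, List.getElem?_eq_getElem hlt]
        have hgetm : PySem.List.pyGet? s ((n : Int) - (d : Int)) = some (s[n - d]'(by omega)) := by
          have : (n : Int) - (d : Int) = ((n - d : Nat) : Int) := by push_cast [hdn]; ring
          rw [this, PySem.List.pyGet?_natCast, List.getElem?_eq_getElem (by omega)]
        rw [hgetp, hgetm, hzip]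
        by_cases heq : s[n + d]'hlt = s[n - d]'(by omega)
        · rw [if_pos (by rw [heq]), countEq, if_pos heq.symm]
          have hdi : (d : Int) + 1 = ((d + 1 : Nat) : Int) := by push_cast; ring
          rw [hdi, ih (L + 2) (d + 1) (by omega) (by omega)]
          have : d + 1 - 1 = d := by omega
          rw [this]; ring
        · rw [if_neg (by intro h; exact heq (Option.some.inj h)), countEq,
              if_neg (fun h => heq h.symm)]
          ring
      · rw [dif_neg hcond]
        push_cast at hcond
        have : (((s.take n).reverse.drop (d - 1)).zip ((s.drop (n + 1)).drop (d - 1))) = [] := by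
          by_cases hlen : s.length ≤ n + d
          · have hr : ((s.drop (n + 1)).drop (d - 1)) = [] := by
              apply List.eq_nil_of_length_eq_zero
              simp [List.length_drop]; omega
            rw [hr, List.zip_nil_right]
          · have hnd : n < d := by omega
            have hl : ((s.take n).reverse.drop (d - 1)) = [] := by
              apply List.eq_nil_of_length_eq_zero
              simp [List.length_take]; omega
            rw [hl, List.zip_nil_left]
        rw [this]; simp [countEq]

-- ===== VERDICT (by name: the statement is the Claim_ definition above) =====
theorem odd_palindrome_length_spec : Claim_equal_odd_palindrome_length := by
  intro base_string middle _
  unfold Spec_odd_palindrome_length odd_palindrome_length odd_palindrome_length_alt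
  set s := base_string.toList with hs
  show oplLoop s middle 1 1 =
    1 + 2 * countEq
      (((PySem.List.slice s
            (some (middle - max 0 (min middle ((s.length : Int) - middle - 1))))
            (some middle)).reverse).zip
        (PySem.List.slice s (some (middle + 1))
          (some (middle + 1 + max 0 (min middle ((s.length : Int) - middle - 1))))))
  by_cases hm : middle < 0
  · -- radius = 0, both slices are s[m:m] = []
    have hr : max 0 (min middle ((s.length : Int) - middle - 1)) = 0 := by omega
    simp only [hr, sub_zero, add_zero]
    rw [slice_self, slice_self]
    simp [countEq]
    rw [oplLoop, dif_neg (by omega)]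
  · by_cases hml : middle < (s.length : Int)
    · -- the main case: 0 ≤ middle < len
      obtain ⟨n, rfl⟩ : ∃ n : Nat, middle = (n : Int) :=
        ⟨middle.toNat, (Int.toNat_of_nonneg (by omega)).symm⟩
      have hnlen : n < s.length := by exact_mod_cast hml
      set r : Int := max 0 (min (n : Int) ((s.length : Int) - n - 1)) with hrdef
      obtain ⟨rn, hrn⟩ : ∃ rn : Nat, r = (rn : Int) :=
        ⟨r.toNat, (Int.toNat_of_nonneg (by omega)).symm⟩
      have hrn_eq : rn = min n (s.length - n - 1) := by omega
      -- left slice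
      have hml1 : (n : Int) - r = ((n - rn : Nat) : Int) := by omega
      have hleft : PySem.List.slice s (some ((n : Int) - r)) (some (n : Int)) =
          (s.drop (n - rn)).take rn := by
        rw [hml1, PySem.List.slice_natCast]
        congr 1
        omega
      -- right slice
      have hml2 : (n : Int) + 1 = ((n + 1 : Nat) : Int) := by push_cast; ring
      have hright : PySem.List.slice s (some ((n : Int) + 1)) (some ((n : Int) + 1 + r)) =
          (s.drop (n + 1)).take rn := by
        have h3 : (n : Int) + 1 + r = ((n + 1 : Nat) : Int) + ((rn : Nat) : Int) := by
          push_cast; omega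
        rw [h3, hml2, PySem.List.slice_natCast_add]
      rw [hleft, hright]
      -- left reversed = (s.take n).reverse.take rn
      have htlen : (s.take n).length = n := by simp; omega
      have hldt : (s.drop (n - rn)).take rn = (s.take n).drop (n - rn) := by
        rw [List.drop_take]
        congr 1
        omega
      have hlrev : ((s.drop (n - rn)).take rn).reverse = (s.take n).reverse.take rn := by
        rw [hldt, List.reverse_drop, htlen]
        congr 1
        omega
      rw [hlrev]
      -- zip of takes = take of zip = full zip (zip length is exactly rn)
      have hzt : ((s.take n).reverse.take rn).zip ((s.drop (n + 1)).take rn) =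
          ((s.take n).reverse.zip (s.drop (n + 1))).take rn := by
        simp [List.zip, List.take_zipWith]
      have hzlen : ((s.take n).reverse.zip (s.drop (n + 1))).length = rn := by
        simp [List.length_zip, htlen]
        omega
      have hfull : ((s.take n).reverse.zip (s.drop (n + 1))).take rn =
          (s.take n).reverse.zip (s.drop (n + 1)) := by
        apply List.take_of_length_le
        omega
      rw [hzt, hfull]
      have hmain := oplLoop_eq s s.length 1 n 1 (le_refl 1) (by omega)
      rw [Nat.cast_one] at hmain
      simp only [Nat.sub_self, List.drop_zero] at hmain
      rw [hmain]
    · -- middle ≥ len: radius = 0, both slices empty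
      have hr : max 0 (min middle ((s.length : Int) - middle - 1)) = 0 := by omega
      simp only [hr, sub_zero, add_zero]
      rw [slice_self, slice_self]
      simp [countEq]
      rw [oplLoop, dif_neg (by omega)]
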